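-- pv_equiv track=rewrite | github.com/sitaramaprasad-e/Prolifics-Sallimae-scripts | Sallie/tools/patch/resolve_dupe_logics.py | find_duplicate_names
-- ===== SOURCE A (Python) =====
-- from typing import Any, Dict, List, Tuple
--
-- def find_duplicate_names(logics: List[Dict[str, Any]]) -> Dict[str, List[int]]:
--     """Return mapping name -> list of indices where that name appears (only for dupes)."""
--     name_to_indices: Dict[str, List[int]] = {}
--
--     for idx, logic in enumerate(logics):
--         name = logic.get("name")
--         if not name:
--             # Ignore nameless logics for this check
--             continue
--         name_to_indices.setdefault(name, []).append(idx)
--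
--     dupes = {name: idxs for name, idxs in name_to_indices.items() if len(idxs) > 1}
--     return dupes
-- ===== SOURCE B (Python) =====
-- from typing import Any, Dict, List
--
-- def find_duplicate_names(logics: List[Dict[str, Any]]) -> Dict[str, List[int]]:
--     """Return mapping name -> list of indices where that name appears (only for dupes)."""
--     counts: Dict[str, int] = {}
--     for logic in logics:
--         name = logic.get("name")
--         if not name:
--             continue
--         counts[name] = counts.get(name, 0) + 1
--     dupes: Dict[str, List[int]] = {}
--     for idx, logic in enumerate(logics):
--         name = logic.get("name")
--         if name and counts[name] > 1:
--             dupes.setdefault(name, []).append(idx)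
--     return dupes
-- ===== Notes on version B (the rewrite author's own statement) =====
-- stated objective: alternative
-- what changed: Replaces A's group-everything-then-filter shape (one grouping dict comprehension-filtered at the end) by a count-first, collect-second two-pass: a counter of truthy names, then a second enumerate pass that appends an index only when its name's total count exceeds 1, returning the dict directly.
import Mathlib
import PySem

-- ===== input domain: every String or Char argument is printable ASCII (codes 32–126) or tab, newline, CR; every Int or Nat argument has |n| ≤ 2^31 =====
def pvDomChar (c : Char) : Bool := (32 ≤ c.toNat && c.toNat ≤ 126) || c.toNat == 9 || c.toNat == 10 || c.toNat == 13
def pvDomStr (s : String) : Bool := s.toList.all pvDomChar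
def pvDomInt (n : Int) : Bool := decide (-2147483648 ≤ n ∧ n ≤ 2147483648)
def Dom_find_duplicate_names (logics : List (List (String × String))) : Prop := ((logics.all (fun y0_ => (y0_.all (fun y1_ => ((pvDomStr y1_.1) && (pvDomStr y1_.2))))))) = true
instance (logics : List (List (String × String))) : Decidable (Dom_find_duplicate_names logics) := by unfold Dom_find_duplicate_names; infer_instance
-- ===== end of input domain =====

-- B replaces A's group-then-filter by a count-first, collect-second two-pass; same cost, different decomposition.


-- ===== PORT A =====
-- for idx, logic in enumerate(logics): name = logic.get("name"); if not name: continue;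
-- name_to_indices.setdefault(name, []).append(idx)  — then keep only entries with len > 1.
def find_duplicate_names (logics : List (List (String × String))) : List (String × List Int) :=
  let name_to_indices :=
    (PySem.List.enumerate logics).foldl
      (fun d p =>
        match (PySem.Dict.mk p.2).get? "name" with
        | none => d
        | some name => if name == "" then d else d.modify name [] (fun l => l ++ [p.1]))
      (PySem.Dict.empty : PySem.Dict String (List Int))
  name_to_indices.items.filter (fun e => decide (e.2.length > 1))

-- ===== PORT B =====
-- pass 1: counts[name] = counts.get(name, 0) + 1 for truthy names;
-- pass 2: if name and counts[name] > 1: dupes.setdefault(name, []).append(idx); return dupes.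
def find_duplicate_names_alt (logics : List (List (String × String))) : List (String × List Int) :=
  let counts :=
    logics.foldl
      (fun c logic =>
        match (PySem.Dict.mk logic).get? "name" with
        | none => c
        | some name => if name == "" then c else c.insert name (c.getD name 0 + 1))
      (PySem.Dict.empty : PySem.Dict String Int)
  let dupes :=
    (PySem.List.enumerate logics).foldl
      (fun r p =>
        match (PySem.Dict.mk p.2).get? "name" with
        | none => r
        | some name =>
          if name == "" then r
          else if 1 < counts.getD name 0 then r.modify name [] (fun l => l ++ [p.1]) else r)
      (PySem.Dict.empty : PySem.Dict String (List Int))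
  dupes.items

-- ===== PRECONDITION & SPEC =====
def Spec_find_duplicate_names (logics : List (List (String × String))) (out : List (String × List Int)) : Prop := out = find_duplicate_names_alt logics
instance (logics : List (List (String × String))) (out : List (String × List Int)) : Decidable (Spec_find_duplicate_names logics out) := by unfold Spec_find_duplicate_names; infer_instance

-- ===== CLAIM (what is proved, stated in full; the proofs are below) =====
def Claim_equal_find_duplicate_names : Prop := ∀ (logics : List (List (String × String))), Dom_find_duplicate_names logics → Spec_find_duplicate_names logics (find_duplicate_names logics)

-- ===== LEMMAS AND PROOFS =====

-- the name a logic contributes, if truthy, paired with its index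
def pvKey (p : Int × List (String × String)) : Option (String × Int) :=
  match (PySem.Dict.mk p.2).get? "name" with
  | none => none
  | some name => if name == "" then none else some (name, p.1)

-- the name alone (B's counting pass)
def pvKey0 (logic : List (String × String)) : Option String :=
  match (PySem.Dict.mk logic).get? "name" with
  | none => none
  | some name => if name == "" then none else some name

-- the counted names are exactly the first components of the collected (name, idx) pairs
theorem pv_map_fst_key : ∀ (logics : List (List (String × String))) (s : Int),
    ((PySem.List.enumerate logics s).filterMap pvKey).map Prod.fst = logics.filterMap pvKey0 := by
  intro logics
  induction logics with
  | nil => intro s; rfl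
  | cons x t ih =>
    intro s
    simp only [PySem.List.enumerate, List.filterMap_cons]
    cases hk : (PySem.Dict.mk x).get? "name" with
    | none => simpa [pvKey, pvKey0, hk] using ih (s + 1)
    | some name =>
      by_cases he : name == ""
      · simpa [pvKey, pvKey0, hk, he] using ih (s + 1)
      · simpa [pvKey, pvKey0, hk, he] using ih (s + 1)

-- find? for a key survives filtering by a key-predicate that holds at that key
theorem pv_find?_filter {ν : Type} (n : String) (p : String → Bool) (hp : p n = true) :
    ∀ (l : List (String × ν)),
      (l.filter (fun e => p e.1)).find? (fun e => e.1 == n) = l.find? (fun e => e.1 == n) := by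
  intro l
  induction l with
  | nil => rfl
  | cons e t ih =>
    by_cases he : e.1 = n
    · simp [he, hp]
    · by_cases hpe : p e.1 = true
      · simp [he, hpe, ih]
      · simp [he, hpe, ih]

theorem pv_any_filter {ν : Type} (n : String) (p : String → Bool) (hp : p n = true) :
    ∀ (l : List (String × ν)),
      (l.filter (fun e => p e.1)).any (fun e => e.1 == n) = l.any (fun e => e.1 == n) := by
  intro l
  induction l with
  | nil => rfl
  | cons e t ih =>
    by_cases he : e.1 = n
    · simp [he, hp]
    · by_cases hpe : p e.1 = true
      · simp [hpe, ih]
      · simp [he, hpe, ih]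

-- overwriting the entry at a key dropped by the filter does not change the filtered items
theorem pv_filter_map_subst_neg {ν : Type} (n : String) (v : ν) (p : String → Bool)
    (hp : p n = false) :
    ∀ (l : List (String × ν)),
      (l.map (fun e => if e.1 = n then (n, v) else e)).filter (fun e => p e.1)
        = l.filter (fun e => p e.1) := by
  intro l
  induction l with
  | nil => rfl
  | cons e t ih =>
    by_cases he : e.1 = n
    · simp [he, hp, ih]
    · by_cases hpe : p e.1 = true
      · simp [he, hpe, ih]
      · simp [he, hpe, ih]

-- overwriting the entry at a key kept by the filter commutes with the filter
theorem pv_filter_map_subst_pos {ν : Type} (n : String) (v : ν) (p : String → Bool)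
    (hp : p n = true) :
    ∀ (l : List (String × ν)),
      (l.map (fun e => if e.1 = n then (n, v) else e)).filter (fun e => p e.1)
        = (l.filter (fun e => p e.1)).map (fun e => if e.1 = n then (n, v) else e) := by
  intro l
  induction l with
  | nil => rfl
  | cons e t ih =>
    by_cases he : e.1 = n
    · simp [he, hp, ih]
    · by_cases hpe : p e.1 = true
      · simp [he, hpe, ih]
      · simp [he, hpe, ih]

-- MAIN: collecting only p-names equals collecting all names then filtering entries by p on the key
theorem pv_main (p : String → Bool) :
    ∀ (qs : List (String × Int)) (d r : PySem.Dict String (List Int)),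
      r.items = d.items.filter (fun e => p e.1) →
      (qs.foldl (fun r x => if p x.1 then r.modify x.1 [] (fun l => l ++ [x.2]) else r) r).items
        = (qs.foldl (fun d x => d.modify x.1 [] (fun l => l ++ [x.2])) d).items.filter
            (fun e => p e.1) := by
  intro qs
  induction qs with
  | nil => intro d r h; simpa using h
  | cons x t ih =>
    intro d r h
    simp only [List.foldl_cons]
    by_cases hp : p x.1 = true
    · -- both sides extend the entry at x.1
      have hfind : r.items.find? (fun e => e.1 == x.1) = d.items.find? (fun e => e.1 == x.1) := by
        rw [h, pv_find?_filter x.1 p hp]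
      have hget : r.getD x.1 [] = d.getD x.1 [] := by
        simp only [PySem.Dict.getD, PySem.Dict.get?, hfind]
      have hcon : r.contains x.1 = d.contains x.1 := by
        simp only [PySem.Dict.contains, h, pv_any_filter x.1 p hp]
      rw [if_pos hp]
      apply ih
      simp only [PySem.Dict.modify]
      by_cases hc : d.contains x.1 = true
      · rw [PySem.Dict.items_insert_of_contains _ _ (hcon.trans hc),
            PySem.Dict.items_insert_of_contains _ _ hc, h, hget]
        simp only [beq_iff_eq]
        rw [pv_filter_map_subst_pos x.1 _ p hp]
      · have hc' : d.contains x.1 = false := by simpa using hc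
        rw [PySem.Dict.items_insert_of_not_contains _ _ (hcon.trans hc'),
            PySem.Dict.items_insert_of_not_contains _ _ hc', h, hget,
            List.filter_append]
        simp [hp]
    · -- B skips x; A's new entry at x.1 is dropped by the filter
      have hp' : p x.1 = false := by simpa using hp
      rw [if_neg hp]
      apply ih
      simp only [PySem.Dict.modify]
      by_cases hc : d.contains x.1 = true
      · rw [PySem.Dict.items_insert_of_contains _ _ hc]
        simp only [beq_iff_eq]
        rw [pv_filter_map_subst_neg x.1 _ p hp', h]
      · have hc' : d.contains x.1 = false := by simpa using hc
        rw [PySem.Dict.items_insert_of_not_contains _ _ hc', List.filter_append]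
        simp [hp', h]

-- the collection predicate B tests: the name occurs more than once among the truthy names
def pvP (logics : List (List (String × String))) (n : String) : Bool :=
  decide (1 < ((logics.filterMap pvKey0).count n : Int))

-- A's loop, as a fold over the collected (name, index) pairs
theorem pv_A_fold (l : List (Int × List (String × String))) :
    ∀ (init : PySem.Dict String (List Int)),
      l.foldl
        (fun d p =>
          match (PySem.Dict.mk p.2).get? "name" with
          | none => d
          | some name => if name == "" then d else d.modify name [] (fun l => l ++ [p.1]))
        init
      = (l.filterMap pvKey).foldl
          (fun d x => d.modify x.1 [] (fun l => l ++ [x.2])) init := by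
  induction l with
  | nil => intro init; rfl
  | cons x t ih =>
    intro init
    simp only [List.foldl_cons, List.filterMap_cons, pvKey]
    cases hk : (PySem.Dict.mk x.2).get? "name" with
    | none => exact ih init
    | some name =>
      by_cases he : (name == "") = true
      · simp only [he, if_true]; exact ih init
      · simp only [he, Bool.false_eq_true, if_false, List.foldl_cons]
        exact ih _

theorem pv_A_eq (logics : List (List (String × String))) :
    find_duplicate_names logics
      = (((PySem.List.enumerate logics).filterMap pvKey).foldl
          (fun d x => d.modify x.1 [] (fun l => l ++ [x.2])) PySem.Dict.empty).items.filter
          (fun e => decide (e.2.length > 1)) := by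
  simp only [find_duplicate_names]
  rw [pv_A_fold]

-- B's counting loop, as a fold over the truthy names
theorem pv_counts_fold (l : List (List (String × String))) :
    ∀ (init : PySem.Dict String Int),
      l.foldl
        (fun c logic =>
          match (PySem.Dict.mk logic).get? "name" with
          | none => c
          | some name => if name == "" then c else c.insert name (c.getD name 0 + 1))
        init
      = (l.filterMap pvKey0).foldl (fun c n => c.insert n (c.getD n 0 + 1)) init := by
  induction l with
  | nil => intro init; rfl
  | cons x t ih =>
    intro init
    simp only [List.foldl_cons, List.filterMap_cons, pvKey0]
    cases hk : (PySem.Dict.mk x).get? "name" with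
    | none => exact ih init
    | some name =>
      by_cases he : (name == "") = true
      · simp only [he, if_true]; exact ih init
      · simp only [he, Bool.false_eq_true, if_false, List.foldl_cons]
        exact ih _

-- B's collecting loop, as a guarded fold over the collected (name, index) pairs
theorem pv_B_fold (C : PySem.Dict String Int) (l : List (Int × List (String × String))) :
    ∀ (init : PySem.Dict String (List Int)),
      l.foldl
        (fun r p =>
          match (PySem.Dict.mk p.2).get? "name" with
          | none => r
          | some name =>
            if name == "" then r
            else if 1 < C.getD name 0 then r.modify name [] (fun l => l ++ [p.1]) else r)
        init
      = (l.filterMap pvKey).foldl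
          (fun r x => if 1 < C.getD x.1 0 then r.modify x.1 [] (fun l => l ++ [x.2]) else r)
          init := by
  induction l with
  | nil => intro init; rfl
  | cons x t ih =>
    intro init
    simp only [List.foldl_cons, List.filterMap_cons, pvKey]
    cases hk : (PySem.Dict.mk x.2).get? "name" with
    | none => exact ih init
    | some name =>
      by_cases he : (name == "") = true
      · simp only [he, if_true]; exact ih init
      · simp only [he, Bool.false_eq_true, if_false, List.foldl_cons]
        exact ih _

theorem pv_B_eq (logics : List (List (String × String))) :
    find_duplicate_names_alt logics
      = (((PySem.List.enumerate logics).filterMap pvKey).foldl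
          (fun r x => if pvP logics x.1 then r.modify x.1 [] (fun l => l ++ [x.2]) else r)
          PySem.Dict.empty).items := by
  simp only [find_duplicate_names_alt]
  rw [pv_counts_fold, pv_B_fold]
  have hcong :
      ((PySem.List.enumerate logics).filterMap pvKey).foldl
          (fun r x =>
            if (1 : Int) < ((logics.filterMap pvKey0).foldl
                (fun c n => c.insert n (c.getD n 0 + 1)) PySem.Dict.empty).getD x.1 0 then
              r.modify x.1 [] (fun l => l ++ [x.2])
            else r)
          PySem.Dict.empty
        = ((PySem.List.enumerate logics).filterMap pvKey).foldl
            (fun r x => if pvP logics x.1 then r.modify x.1 [] (fun l => l ++ [x.2]) else r)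
            PySem.Dict.empty := by
    apply PySem.List.foldl_congr_mem
    intro acc x _
    have hc : ((logics.filterMap pvKey0).foldl
        (fun c n => c.insert n (c.getD n 0 + 1)) PySem.Dict.empty).getD x.1 0
        = ((logics.filterMap pvKey0).count x.1 : Int) := by
      rw [PySem.Dict.getD_foldl_insert_add_one]
      simp
    simp only [hc, pvP]
    by_cases h : 1 < ((logics.filterMap pvKey0).count x.1 : Int)
    · simp [h]
    · simp [h]
  exact congrArg PySem.Dict.items hcong

-- the Bool tests of the two ports agree on every entry A's dict ends up with
theorem pv_pred_eq (logics : List (List (String × String))) (e : String × List Int)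
    (he : e ∈ (((PySem.List.enumerate logics).filterMap pvKey).foldl
          (fun d x => d.modify x.1 [] (fun l => l ++ [x.2])) PySem.Dict.empty).items) :
    decide (e.2.length > 1) = pvP logics e.1 := by
  have hnd : ((((PySem.List.enumerate logics).filterMap pvKey).foldl
      (fun d x => d.modify x.1 [] (fun l => l ++ [x.2])) PySem.Dict.empty)).keys.Nodup := by
    simp only [PySem.Dict.modify]
    exact PySem.Dict.nodup_keys_foldl_insert_key
      (l := (PySem.List.enumerate logics).filterMap pvKey)
      (key := fun x : String × Int => x.1)
      (f := fun (d : PySem.Dict String (List Int)) (x : String × Int) => d.getD x.1 [] ++ [x.2])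
      (d := PySem.Dict.empty) (by simp [pysem])
  rcases e with ⟨k, v⟩
  have hv := PySem.Dict.getD_of_mem_items _ he hnd []
  rw [PySem.Dict.getD_foldl_modify_append] at hv
  simp only [PySem.Dict.getD_empty, List.nil_append] at hv
  have hlen : v.length
      = ((PySem.List.enumerate logics).filterMap pvKey).countP (fun q => q.1 == k) := by
    rw [← hv]
    simp [List.countP_eq_length_filter]
  have hcnt : (logics.filterMap pvKey0).count k
      = ((PySem.List.enumerate logics).filterMap pvKey).countP (fun q => q.1 == k) := by
    rw [← pv_map_fst_key logics 0, List.count_eq_countP, List.countP_map]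
    rfl
  simp only [pvP, hcnt, hlen]
  rw [decide_eq_decide]
  omega

-- ===== VERDICT (by name: the statement is the Claim_ definition above) =====
theorem find_duplicate_names_spec : Claim_equal_find_duplicate_names := by
  intro logics _
  unfold Spec_find_duplicate_names
  rw [pv_A_eq, pv_B_eq,
      List.filter_congr (fun e he => pv_pred_eq logics e he),
      ← pv_main (pvP logics) _ PySem.Dict.empty PySem.Dict.empty rfl]
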